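-- pv_equiv track=rewrite | github.com/AgainTW/Genetic-Algorithm | GA - 複製2.py | path_gen
-- ===== SOURCE A (Python) =====
-- def path_gen(chromo, length):
-- 	path = [] 										# 計數
-- 	stack = list(range(1,length+1))
-- 	for i in chromo[:]:								# 執行除了最後一個外的
-- 		temp = i 									# 不含已用過的數的計數
-- 		count = 0 									# 計數，stack[count]
-- 		while( temp != -1 and count<len(stack) ):
-- 			if(stack[count]>=0):					# 判斷後temp-1
-- 				if( temp==1 ):
-- 					path.append(stack[count])
-- 					stack[count] = -1
-- 				temp = temp - 1
-- 			count = count + 1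
-- 	for i in stack:
-- 		if(i!=-1):	path.append(i)
--
-- 	return path
-- ===== SOURCE B (Python) =====
-- def path_gen(chromo, length):
--     avail = list(range(1, length + 1))
--     path = []
--     for i in chromo:
--         if 1 <= i <= len(avail):
--             path.append(avail.pop(i - 1))
--     return path + avail
-- ===== Notes on version B (the rewrite author's own statement) =====
-- stated objective: faster
-- what changed: Instead of marking used slots with -1 and rescanning the whole fixed-size stack with a countdown for every gene, B keeps only the remaining elements in a shrinking list and pops the (i-1)-th one directly when 1 <= i <= len(avail).
import Mathlib
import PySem

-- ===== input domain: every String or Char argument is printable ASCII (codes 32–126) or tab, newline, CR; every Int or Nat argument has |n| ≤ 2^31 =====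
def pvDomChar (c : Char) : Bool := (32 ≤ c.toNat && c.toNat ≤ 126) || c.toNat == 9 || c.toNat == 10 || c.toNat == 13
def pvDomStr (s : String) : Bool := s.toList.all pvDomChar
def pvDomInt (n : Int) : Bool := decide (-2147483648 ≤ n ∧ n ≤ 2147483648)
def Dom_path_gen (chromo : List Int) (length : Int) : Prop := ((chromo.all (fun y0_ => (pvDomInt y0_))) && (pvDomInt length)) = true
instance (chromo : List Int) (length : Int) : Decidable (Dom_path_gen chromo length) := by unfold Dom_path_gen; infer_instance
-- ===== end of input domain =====

-- B replaces A's full rescan of a fixed stack with -1 markers (countdown temp over non-negative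
-- slots) by a shrinking list of the remaining elements from which the (i-1)-th is popped directly.

-- ===== PORT A =====
-- the inner 'while temp != -1 and count < len(stack)' loop: walks the stack slots in order,
-- decrementing temp at non-negative slots, appending stack[count] and overwriting it with -1 when temp == 1;
-- returns (appended path elements, updated stack)
def pathGenWhile (temp : Int) (stack : List Int) : List Int × List Int :=
  match stack with
  | [] => ([], [])
  | s :: rest =>
    if temp = -1 then ([], s :: rest)
    else if 0 ≤ s then
      if temp = 1 then
        let pr := pathGenWhile 0 rest
        (s :: pr.1, (-1 : Int) :: pr.2)
      else
        let pr := pathGenWhile (temp - 1) rest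
        (pr.1, s :: pr.2)
    else
      let pr := pathGenWhile temp rest
      (pr.1, s :: pr.2)

-- one iteration of 'for i in chromo' (state = (path, stack))
def pathGenStepA (st : List Int × List Int) (i : Int) : List Int × List Int :=
  let pr := pathGenWhile i st.2
  (st.1 ++ pr.1, pr.2)

def path_gen (chromo : List Int) (length : Int) : List Int :=
  let stack0 := PySem.List.pyRange 1 (length + 1) 1
  let st := chromo.foldl pathGenStepA ([], stack0)
  -- 'for i in stack: if i != -1: path.append(i)'
  st.2.foldl (fun path i => if i ≠ -1 then path ++ [i] else path) st.1

-- ===== PORT B =====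
-- one iteration of 'for i in chromo' (state = (path, avail))
def pathGenStepB (st : List Int × List Int) (i : Int) : List Int × List Int :=
  if 1 ≤ i ∧ i ≤ PySem.List.len st.2 then
    match PySem.List.pop? st.2 (i - 1) with
    | some vr => (st.1 ++ [vr.1], vr.2)
    | none => st          -- unreachable: the guard puts i-1 in range
  else st

def path_gen_alt (chromo : List Int) (length : Int) : List Int :=
  let st := chromo.foldl pathGenStepB ([], PySem.List.pyRange 1 (length + 1) 1)
  st.1 ++ st.2

-- ===== PRECONDITION & SPEC =====
def Spec_path_gen (chromo : List Int) (length : Int) (out : List Int) : Prop := out = path_gen_alt chromo length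
instance (chromo : List Int) (length : Int) (out : List Int) : Decidable (Spec_path_gen chromo length out) := by unfold Spec_path_gen; infer_instance

-- ===== CLAIM (what is proved, stated in full; the proofs are below) =====
def Claim_equal_path_gen : Prop := ∀ (chromo : List Int) (length : Int), Dom_path_gen chromo length → Spec_path_gen chromo length (path_gen chromo length)

-- ===== LEMMAS AND PROOFS =====

-- slots of A's stack are either the -1 marker or an original (positive) element
def GoodStack (stack : List Int) : Prop := ∀ s ∈ stack, s = -1 ∨ 1 ≤ s

-- when i does not select an available slot, the while loop changes nothing
lemma whileA_skip (stack : List Int) (temp : Int)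
    (h : ¬ (1 ≤ temp ∧ temp ≤ (stack.filter (fun s => 0 ≤ s)).length)) :
    pathGenWhile temp stack = ([], stack) := by
  induction stack generalizing temp with
  | nil => rfl
  | cons s rest ih =>
    by_cases hm1 : temp = -1
    · simp [pathGenWhile, hm1]
    · by_cases hs : (0 : Int) ≤ s
      · have hlen : ((s :: rest).filter (fun s => decide (0 ≤ s))).length
            = (rest.filter (fun s => decide (0 ≤ s))).length + 1 := by
          simp [hs]
        by_cases h1 : temp = 1
        · exfalso
          apply h
          constructor
          · omega
          · simp only [h1] at *
            omega
        · have := ih (temp - 1) (by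
            intro hc
            apply h
            refine ⟨by omega, ?_⟩
            rw [hlen]
            omega)
          simp [pathGenWhile, hm1, hs, h1, this]
      · have := ih temp (by
          intro hc
          apply h
          refine ⟨hc.1, ?_⟩
          simpa [List.filter_cons, hs] using hc.2)
        simp [pathGenWhile, hm1, hs, this]

-- when 1 ≤ temp ≤ #available, the loop picks the temp-th available element and marks its slot
lemma whileA_pick (stack : List Int) (temp : Int) (hg : GoodStack stack)
    (h1 : 1 ≤ temp) (h2 : temp ≤ (stack.filter (fun s => 0 ≤ s)).length) :
    ∃ v stack',
      pathGenWhile temp stack = ([v], stack') ∧ GoodStack stack' ∧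
      (stack.filter (fun s => 0 ≤ s))[temp.toNat - 1]? = some v ∧
      stack'.filter (fun s => 0 ≤ s)
        = (stack.filter (fun s => 0 ≤ s)).eraseIdx (temp.toNat - 1) := by
  induction stack generalizing temp with
  | nil => simp at h2; omega
  | cons s rest ih =>
    have hm1 : temp ≠ -1 := by omega
    have hgrest : GoodStack rest := fun x hx => hg x (List.mem_cons_of_mem _ hx)
    by_cases hs : (0 : Int) ≤ s
    · by_cases ht1 : temp = 1
      · refine ⟨s, (-1 : Int) :: rest, ?_, ?_, ?_, ?_⟩
        · have h0 : pathGenWhile 0 rest = ([], rest) :=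
            whileA_skip rest 0 (by intro hc; omega)
          simp [pathGenWhile, hs, ht1, h0]
        · intro x hx
          rcases List.mem_cons.mp hx with h | h
          · left; exact h
          · exact hg x (List.mem_cons_of_mem _ h)
        · simp [ht1, hs]
        · simp [ht1, hs]
      · have h2' : temp - 1 ≤ (rest.filter (fun s => 0 ≤ s)).length := by
          simp only [List.filter_cons, hs, decide_true, if_true] at h2
          simp only [List.length_cons] at h2
          omega
        obtain ⟨v, rest', heq, hg', hget, herase⟩ :=
          ih (temp - 1) hgrest (by omega) h2'
        have hidx : temp.toNat - 1 = ((temp - 1).toNat - 1) + 1 := by omega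
        refine ⟨v, s :: rest', ?_, ?_, ?_, ?_⟩
        · simp [pathGenWhile, hm1, hs, ht1, heq]
        · intro x hx
          rcases List.mem_cons.mp hx with h | h
          · exact hg s (List.mem_cons_self) |>.imp (fun h' => h ▸ h') (fun h' => h ▸ h')
          · exact hg' x h
        · rw [hidx]
          simp only [List.filter_cons, hs, decide_true, if_true, List.getElem?_cons_succ]
          exact hget
        · rw [hidx]
          simp only [List.filter_cons, hs, decide_true, if_true, List.eraseIdx_cons_succ]
          rw [herase]
    · obtain ⟨v, rest', heq, hg', hget, herase⟩ :=
        ih temp hgrest h1 (by simpa [List.filter_cons, hs] using h2)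
      refine ⟨v, s :: rest', ?_, ?_, ?_, ?_⟩
      · simp [pathGenWhile, hm1, hs, heq]
      · intro x hx
        rcases List.mem_cons.mp hx with h | h
        · exact hg s (List.mem_cons_self) |>.imp (fun h' => h ▸ h') (fun h' => h ▸ h')
        · exact hg' x h
      · simpa [List.filter_cons, hs] using hget
      · simpa [List.filter_cons, hs] using herase

-- the fold over chromo keeps the states of A and B in lock-step:
-- B's avail list is exactly A's stack with the -1 markers filtered out
lemma fold_sim (chromo : List Int) (path stack : List Int) (hg : GoodStack stack) :
    let stA := chromo.foldl pathGenStepA (path, stack)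
    let stB := chromo.foldl pathGenStepB (path, stack.filter (fun s => 0 ≤ s))
    stA.1 = stB.1 ∧ stB.2 = stA.2.filter (fun s => 0 ≤ s) ∧ GoodStack stA.2 := by
  induction chromo generalizing path stack with
  | nil => exact ⟨rfl, rfl, hg⟩
  | cons i ch ih =>
    by_cases hi : 1 ≤ i ∧ i ≤ (stack.filter (fun s => 0 ≤ s)).length
    · obtain ⟨v, stack', heq, hg', hget, herase⟩ := whileA_pick stack i hg hi.1 hi.2
      have hn : i - 1 = ((i.toNat - 1 : Nat) : Int) := by omega
      have hlt : i.toNat - 1 < (stack.filter (fun s => 0 ≤ s)).length := by omega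
      have hpop : PySem.List.pop? (stack.filter (fun s => 0 ≤ s)) (i - 1)
          = some (v, stack'.filter (fun s => 0 ≤ s)) := by
        rw [hn, PySem.List.pop?_natCast _ _ hlt, herase]
        have hgv : (stack.filter (fun s => 0 ≤ s))[i.toNat - 1] = v := by
          have h' := hget
          rw [List.getElem?_eq_getElem hlt] at h'
          exact Option.some.inj h'
        rw [hgv]
      have hguard : 1 ≤ i ∧ i ≤ PySem.List.len ((stack.filter (fun s => 0 ≤ s))) := by
        simpa [PySem.List.len_eq] using hi
      have stepA : pathGenStepA (path, stack) i = (path ++ [v], stack') := by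
        simp [pathGenStepA, heq]
      have stepB : pathGenStepB (path, stack.filter (fun s => 0 ≤ s)) i
          = (path ++ [v], stack'.filter (fun s => 0 ≤ s)) := by
        unfold pathGenStepB
        rw [if_pos hguard]
        simp only [hpop]
      rw [List.foldl_cons, List.foldl_cons, stepA, stepB]
      exact ih (path ++ [v]) stack' hg'
    · have hskip := whileA_skip stack i hi
      have hguard : ¬ (1 ≤ i ∧ i ≤ PySem.List.len ((stack.filter (fun s => 0 ≤ s)))) := by
        simpa [PySem.List.len_eq] using hi
      have stepA : pathGenStepA (path, stack) i = (path, stack) := by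
        simp [pathGenStepA, hskip]
      have stepB : pathGenStepB (path, stack.filter (fun s => 0 ≤ s)) i
          = (path, stack.filter (fun s => 0 ≤ s)) := by
        unfold pathGenStepB
        rw [if_neg hguard]
      rw [List.foldl_cons, List.foldl_cons, stepA, stepB]
      exact ih path stack hg

-- ===== VERDICT (by name: the statement is the Claim_ definition above) =====
theorem path_gen_spec : Claim_equal_path_gen := by
  intro chromo length _
  unfold Spec_path_gen path_gen path_gen_alt
  have hg0 : GoodStack (PySem.List.pyRange 1 (length + 1) 1) := by
    intro s hs
    right
    exact ((PySem.List.mem_pyRange_one).mp hs).1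
  have hfilter0 : (PySem.List.pyRange 1 (length + 1) 1).filter (fun s => 0 ≤ s)
      = PySem.List.pyRange 1 (length + 1) 1 := by
    apply List.filter_eq_self.mpr
    intro s hs
    have := ((PySem.List.mem_pyRange_one).mp hs).1
    simpa using by omega
  obtain ⟨h1, h2, h3⟩ := fold_sim chromo [] (PySem.List.pyRange 1 (length + 1) 1) hg0
  rw [hfilter0] at h1 h2
  simp only [PySem.List.foldl_append_ite_eq_filter]
  rw [h1, h2]
  congr 1
  apply List.filter_congr
  intro x hx
  rcases h3 x hx with h | h
  · simp [h]
  · have hne : x ≠ -1 := by omega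
    have hle : (0 : Int) ≤ x := by omega
    simp [hne, hle]
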